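-- pv_equiv track=rewrite | github.com/ddfn/CSCI160 | defran_lab_8_strings.py | traverse_for
-- ===== SOURCE A (Python) =====
-- def traverse_for(string):
-- 	#get rid of spaces
-- 	smoosh = string.replace(" ", "")
-- 	new_string = ""
-- 	counter = 0
--
--
-- 	#loop over index
-- 	for i in range(0, len(smoosh)):
-- 		new_string += smoosh[i]
-- 		counter += 1
-- 		if(counter == 5):
-- 			new_string += "\n"
-- 			counter = 0
-- 		else:
-- 			new_string += "-"
-- 	return new_string
-- ===== SOURCE B (Python) =====
-- def traverse_for(string):
--     smoosh = string.replace(" ", "")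
--     parts = []
--     for i in range(0, len(smoosh), 5):
--         group = smoosh[i:i+5]
--         parts.append("-".join(group) + ("\n" if len(group) == 5 else "-"))
--     return "".join(parts)
-- ===== Notes on version B (the rewrite author's own statement) =====
-- stated objective: simpler
-- what changed: Replaces A's per-character loop with a running string and a manual reset counter by slicing the despaced string into blocks of five, turning each block into a dash-joined piece plus its trailing separator (newline for a full block, dash otherwise), and joining the pieces at the end.
import Mathlib
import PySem

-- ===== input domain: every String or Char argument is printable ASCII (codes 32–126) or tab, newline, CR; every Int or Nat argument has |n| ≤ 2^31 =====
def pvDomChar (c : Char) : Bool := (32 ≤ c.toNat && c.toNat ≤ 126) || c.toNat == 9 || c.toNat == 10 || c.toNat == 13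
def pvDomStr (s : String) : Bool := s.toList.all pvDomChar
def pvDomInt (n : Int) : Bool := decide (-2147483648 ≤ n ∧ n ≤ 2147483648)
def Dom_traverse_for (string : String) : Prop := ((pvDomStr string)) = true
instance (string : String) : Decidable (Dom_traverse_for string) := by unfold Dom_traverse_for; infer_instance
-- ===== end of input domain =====

-- B groups the despaced string into blocks of 5 and joins, instead of A's per-character loop with a counter; objective: simpler.

-- ===== PORT A =====
-- A: smoosh = string.replace(" ", ""); then for each character append it and
-- either "\n" (counter hits 5, reset) or "-" (state: accumulated chars, counter).
def traverseAStep (st : List Char × Nat) (c : Char) : List Char × Nat :=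
  let acc := st.1 ++ [c]
  let counter := st.2 + 1
  if counter == 5 then (acc ++ ['\n'], 0) else (acc ++ ['-'], counter)

def traverse_for (string : String) : String :=
  let smoosh := (PySem.Str.replace string " " "").toList
  String.mk (smoosh.foldl traverseAStep ([], 0)).1

-- ===== PORT B =====
-- B: slice the despaced chars into blocks of 5; each block becomes
-- intersperse '-' ++ ['\n' if full block else '-']; concatenate.
def altGroups : List Char → List Char
  | [] => []
  | c :: cs =>
    let g := (c :: cs).take 5
    (List.intersperse '-' g) ++ [if g.length == 5 then '\n' else '-']
      ++ altGroups (cs.drop 4)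
termination_by l => l.length
decreasing_by simp

def traverse_for_alt (string : String) : String :=
  String.mk (altGroups (PySem.Str.replace string " " "").toList)

-- ===== PRECONDITION & SPEC =====
def Spec_traverse_for (string : String) (out : String) : Prop := out = traverse_for_alt string
instance (string : String) (out : String) : Decidable (Spec_traverse_for string out) := by unfold Spec_traverse_for; infer_instance

-- ===== CLAIM (what is proved, stated in full; the proofs are below) =====
def Claim_equal_traverse_for : Prop := ∀ (string : String), Dom_traverse_for string → Spec_traverse_for string (traverse_for string)

-- ===== LEMMAS AND PROOFS =====

-- k = chars still to emit before the next newline (1..5): a mid-group view of the output.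
def groupTail : Nat → List Char → List Char
  | _, [] => []
  | k, c :: cs => c :: (if k = 1 then '\n' :: groupTail 5 cs else '-' :: groupTail (k - 1) cs)

lemma foldA_eq_groupTail (l : List Char) : ∀ (acc : List Char) (counter : Nat),
    counter < 5 → (l.foldl traverseAStep (acc, counter)).1 = acc ++ groupTail (5 - counter) l := by
  induction l with
  | nil => intro acc counter _; simp [groupTail]
  | cons c cs ih =>
    intro acc counter h
    simp only [List.foldl_cons, traverseAStep]
    by_cases h5 : counter + 1 = 5
    · have : 5 - counter = 1 := by omega
      rw [if_pos (by simp [h5]), ih (acc ++ [c] ++ ['\n']) 0 (by omega)]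
      simp [groupTail, this]
    · have h1 : 5 - counter ≠ 1 := by omega
      have h2 : 5 - counter - 1 = 5 - (counter + 1) := by omega
      rw [if_neg (by simp; omega), ih (acc ++ [c] ++ ['-']) (counter + 1) (by omega)]
      simp [groupTail, h1, h2]

lemma altGroups_eq_groupTail : ∀ (n : Nat) (l : List Char), l.length ≤ n → altGroups l = groupTail 5 l := by
  intro n
  induction n with
  | zero => intro l h; simp at h; simp [h, altGroups.eq_def, groupTail]
  | succ n ih =>
    intro l h
    match l with
    | [] => simp [altGroups.eq_def, groupTail]
    | [a] => simp [altGroups.eq_def, groupTail]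
    | [a, b] => simp [altGroups.eq_def, groupTail, List.intersperse]
    | [a, b, c] => simp [altGroups.eq_def, groupTail, List.intersperse]
    | [a, b, c, d] => simp [altGroups.eq_def, groupTail, List.intersperse]
    | a :: b :: c :: d :: e :: rest =>
      have hr : rest.length ≤ n := by simp at h; omega
      rw [altGroups]
      simp [groupTail, ih rest hr, List.intersperse]

theorem traverse_for_eq (string : String) : traverse_for string = traverse_for_alt string := by
  show String.mk (((PySem.Str.replace string " " "").toList.foldl traverseAStep ([], 0)).1) = _
  rw [foldA_eq_groupTail _ [] 0 (by omega), traverse_for_alt,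
      altGroups_eq_groupTail (PySem.Str.replace string " " "").toList.length _ le_rfl]
  simp

-- ===== VERDICT (by name: the statement is the Claim_ definition above) =====
theorem traverse_for_spec : Claim_equal_traverse_for := by
  intro s _
  exact traverse_for_eq s
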